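-- pv_equiv track=rewrite | github.com/zhuxiangqun/RANGEN-V2 | evaluation/benchmarks/analyzers/improved_hardcoded_data_analyzer.py | _is_simulated_string
-- ===== SOURCE A (Python) =====
-- def _is_simulated_string(s: str) -> bool:
--     """检查字符串是否看起来像模拟数据"""
--     if not s or len(s) < 2:
--         return False
--
--     # 检查是否包含模拟数据标识
--     simulated_patterns = [
--         'test', 'mock', 'fake', 'dummy', 'sample', 'example',
--         'placeholder', 'temp', 'temporary', 'simulated'
--     ]
--
--     s_lower = s.lower()
--     for pattern in simulated_patterns:
--         if pattern in s_lower: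
--             return True
--
--     return False
-- ===== SOURCE B (Python) =====
-- _MARKERS = ('test', 'mock', 'fake', 'dummy', 'sample', 'example',
--             'placeholder', 'temp', 'temporary', 'simulated')
--
--
-- def _is_simulated_string(s: str) -> bool:
--     if not s or len(s) < 2:
--         return False
--     t = s.lower()
--     # single left-to-right pass over positions, instead of ten separate substring scans
--     for i in range(len(t)):
--         for m in _MARKERS:
--             if t.startswith(m, i):
--                 return True
--     return False
-- ===== Notes on version B (the rewrite author's own statement) =====
-- stated objective: alternative
-- what changed: A runs ten independent substring-membership scans over the lowered string; B makes a single left-to-right pass over positions and at each position checks whether any marker starts there.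
import Mathlib
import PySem

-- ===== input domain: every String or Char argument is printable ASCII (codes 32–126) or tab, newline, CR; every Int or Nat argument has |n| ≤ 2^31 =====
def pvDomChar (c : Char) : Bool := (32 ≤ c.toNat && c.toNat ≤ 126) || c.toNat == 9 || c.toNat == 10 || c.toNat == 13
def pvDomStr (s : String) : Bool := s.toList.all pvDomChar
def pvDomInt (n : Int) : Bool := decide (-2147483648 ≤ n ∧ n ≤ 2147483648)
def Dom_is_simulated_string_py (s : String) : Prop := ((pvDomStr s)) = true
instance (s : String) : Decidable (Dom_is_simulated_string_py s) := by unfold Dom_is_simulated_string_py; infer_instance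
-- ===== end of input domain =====

-- B replaces A's ten independent substring scans with one left-to-right pass that
-- checks at each position whether some marker starts there (objective: alternative).

-- ===== PORT A =====
def pvPatterns : List String :=
  ["test", "mock", "fake", "dummy", "sample", "example",
   "placeholder", "temp", "temporary", "simulated"]

def is_simulated_string_py (s : String) : Bool :=
  if s == "" || PySem.Str.len s < 2 then false
  else
    let s_lower := PySem.Str.lower s
    -- for pattern in simulated_patterns: if pattern in s_lower: return True
    pvPatterns.any (fun pattern => PySem.Str.isIn pattern s_lower)

-- ===== PORT B =====
def pvMarkers : List (List Char) :=
  ["test".toList, "mock".toList, "fake".toList, "dummy".toList, "sample".toList,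
   "example".toList, "placeholder".toList, "temp".toList, "temporary".toList,
   "simulated".toList]

-- the loop 'for i in range(len(t)): for m in _MARKERS: if t.startswith(m, i)':
-- recursion over the suffix starting at position i
def pvScan : List Char → Bool
  | [] => false
  | c :: rest =>
    if pvMarkers.any (fun m => PySem.Chars.startswith (c :: rest) m) then true
    else pvScan rest

def is_simulated_string_py_alt (s : String) : Bool :=
  if s == "" || PySem.Str.len s < 2 then false
  else pvScan (PySem.Str.lower s).toList

-- ===== PRECONDITION & SPEC =====
def Spec_is_simulated_string_py (s : String) (out : Bool) : Prop := out = is_simulated_string_py_alt s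
instance (s : String) (out : Bool) : Decidable (Spec_is_simulated_string_py s out) := by unfold Spec_is_simulated_string_py; infer_instance

-- ===== CLAIM (what is proved, stated in full; the proofs are below) =====
def Claim_equal_is_simulated_string_py : Prop := ∀ (s : String), Dom_is_simulated_string_py s → Spec_is_simulated_string_py s (is_simulated_string_py s)

-- ===== LEMMAS AND PROOFS =====

theorem pvMarkers_ne_nil : ∀ m ∈ pvMarkers, m ≠ [] := by decide

theorem pvScan_iff (t : List Char) :
    pvScan t = true ↔ ∃ m ∈ pvMarkers, m <:+: t := by
  induction t with
  | nil =>
    simp only [pvScan]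
    constructor
    · intro h; exact absurd h (by simp)
    · rintro ⟨m, hm, hinf⟩
      exact absurd (List.eq_nil_of_infix_nil hinf) (pvMarkers_ne_nil m hm)
  | cons c rest ih =>
    simp only [pvScan]
    by_cases h : pvMarkers.any (fun m => PySem.Chars.startswith (c :: rest) m) = true
    · simp only [h, if_true, true_iff]
      rcases List.any_eq_true.mp h with ⟨m, hm, hsw⟩
      exact ⟨m, hm, (PySem.Chars.startswith_iff _ _ |>.mp hsw).isInfix⟩
    · rw [if_neg h, ih]
      constructor
      · rintro ⟨m, hm, hinf⟩; exact ⟨m, hm, hinf.trans (List.suffix_cons c rest).isInfix⟩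
      · rintro ⟨m, hm, hinf⟩
        rcases List.infix_cons_iff.mp hinf with hpre | hinf'
        · exact absurd (List.any_eq_true.mpr ⟨m, hm, (PySem.Chars.startswith_iff _ _).mpr hpre⟩) h
        · exact ⟨m, hm, hinf'⟩

theorem pvAny_iff (sl : String) :
    pvPatterns.any (fun p => PySem.Str.isIn p sl) = true ↔
      ∃ m ∈ pvMarkers, m <:+: sl.toList := by
  constructor
  · intro h
    rcases List.any_eq_true.mp h with ⟨p, hp, hIn⟩
    refine ⟨p.toList, ?_, (PySem.Str.isIn_iff_infix _ _).mp hIn⟩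
    fin_cases hp <;> decide
  · rintro ⟨m, hm, hinf⟩
    fin_cases hm <;>
      exact List.any_eq_true.mpr ⟨_, by decide, (PySem.Str.isIn_iff_infix _ _).mpr hinf⟩

-- ===== VERDICT (by name: the statement is the Claim_ definition above) =====
theorem is_simulated_string_py_spec : Claim_equal_is_simulated_string_py := by
  intro s _
  unfold Spec_is_simulated_string_py is_simulated_string_py is_simulated_string_py_alt
  by_cases hg : (s == "" || decide (PySem.Str.len s < 2)) = true
  · rw [if_pos hg, if_pos hg]
  · rw [if_neg hg, if_neg hg, Bool.eq_iff_iff, pvAny_iff, pvScan_iff]
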